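-- pv_equiv track=rewrite | github.com/TerrazasJr316/Developing-API-Trees | app.py | bfs
-- ===== SOURCE A (Python) =====
-- from collections import deque
--
-- def bfs(start, goal):
--     queue = deque([(start, [])])
--     visited = set()
--
--     while queue:
--         state, path = queue.popleft()
--         if state == goal:
--             return path + [state]
--         if state in visited:
--             continue
--         visited.add(state)
--         for next_state in get_neighbors(state):
--             if next_state not in visited:
--                 queue.append((next_state, path + [state]))
--
--     return []
--
-- def get_neighbors(state):
--     neighbors = []
--     for i in range(len(state) - 1):
--         new_state = list(state)
--         new_state[i], new_state[i + 1] = new_state[i + 1], new_state[i]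
--         neighbors.append(tuple(new_state))
--     return neighbors
-- ===== SOURCE B (Python) =====
-- def bfs(start, goal):
--     # Level-synchronous BFS: process the frontier one whole level at a time
--     # (plain lists, no deque) and, instead of copying the accumulated path into
--     # every queue entry, keep an append-only journal of expanded states with
--     # integer parent indices; the path is materialised once, at the goal.
--     journal = []
--     frontier = [(start, -1)]
--     visited = set()
--     while frontier:
--         next_frontier = []
--         for state, pi in frontier:
--             if state == goal:
--                 path = [state]
--                 while pi != -1:
--                     st, pi = journal[pi]
--                     path.append(st)
--                 path.reverse()
--                 return path
--             if state in visited: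
--                 continue
--             visited.add(state)
--             journal.append((state, pi))
--             my = len(journal) - 1
--             for i in range(len(state) - 1):
--                 n = state[:i] + (state[i + 1], state[i]) + state[i + 2:]
--                 if n not in visited:
--                     next_frontier.append((n, my))
--         frontier = next_frontier
--     return []
-- ===== Notes on version B (the rewrite author's own statement) =====
-- stated objective: alternative
-- what changed: A is a deque-driven BFS that copies the whole accumulated path list into every queue entry; B is a level-synchronous BFS over explicit frontier/next-frontier lists whose entries carry only an integer index into an append-only journal of expanded states, and the path is materialised once, at the goal.
import Mathlib
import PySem

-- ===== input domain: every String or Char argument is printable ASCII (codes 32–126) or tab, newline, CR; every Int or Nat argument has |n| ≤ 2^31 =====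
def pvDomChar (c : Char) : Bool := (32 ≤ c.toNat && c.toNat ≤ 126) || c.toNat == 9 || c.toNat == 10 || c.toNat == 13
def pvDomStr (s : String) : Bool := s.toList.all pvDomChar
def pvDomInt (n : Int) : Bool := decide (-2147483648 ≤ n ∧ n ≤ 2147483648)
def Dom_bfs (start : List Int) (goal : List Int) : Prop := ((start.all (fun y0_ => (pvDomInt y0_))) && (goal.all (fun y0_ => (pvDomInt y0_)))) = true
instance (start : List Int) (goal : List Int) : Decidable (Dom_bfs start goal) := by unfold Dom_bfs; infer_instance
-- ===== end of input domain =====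

-- B replaces A's deque BFS with per-entry path copies by a level-synchronous BFS
-- whose entries carry an integer index into an append-only journal of expanded
-- states, materialising the path once at the goal (alternative algorithm/bookkeeping).


-- ===== PORT A =====
-- get_neighbors: new_state = list(state); new_state[i], new_state[i+1] = new_state[i+1], new_state[i]
-- (the swapped pair on the right is read from the unmodified state, then the two cells are written)
def get_neighbors (state : List Int) : List (List Int) :=
  (List.range (state.length - 1)).foldl
    (fun neighbors i =>
      neighbors ++ [(state.set i (state.getD (i + 1) 0)).set (i + 1) (state.getD i 0)])
    []

-- the `while queue` loop of A; the deque is the canonical two-list FIFO (popleft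
-- takes from `front`, append conses onto `back`, an exhausted `front` is refilled
-- from `back.reverse`). Queue entries are (state, path). Fuel bounds the number
-- of loop steps (pops + refills); each of the ≤ len! distinct states is expanded
-- once into ≤ len-1 pushes, so steps < the fuel bfs passes in.
def bfs_loop (goal : List Int) :
    Nat → List (List Int × List (List Int)) → List (List Int × List (List Int)) →
    PySem.Set (List Int) → List (List Int)
  | 0, _, _, _ => []
  | fuel + 1, [], back, visited =>
    match back.reverse with
    | [] => []
    | e :: f => bfs_loop goal fuel (e :: f) [] visited
  | fuel + 1, (state, path) :: front', back, visited =>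
    if state = goal then path ++ [state]
    else if PySem.Set.contains visited state then bfs_loop goal fuel front' back visited
    else
      let visited' := PySem.Set.add visited state
      bfs_loop goal fuel front'
        ((get_neighbors state).foldl
          (fun b n => if PySem.Set.contains visited' n then b else (n, path ++ [state]) :: b)
          back)
        visited'

def bfs (start : List Int) (goal : List Int) : List (List Int) :=
  bfs_loop goal (2 * Nat.factorial start.length * start.length + 4) [(start, [])] [] PySem.Set.empty

-- ===== PORT B =====
-- Source B's goal-time reconstruction: path = [state]; while pi != -1:
-- st, pi = journal[pi]; path.append(st); path.reverse(). The fuel (one unit per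
-- journal hop, |journal|+1 supplied) and the `none` branch (Python's IndexError)
-- are unreachable on the loop's journals, whose parent indices are -1 or in range.
def bfs_alt_rebuild (journal : List (List Int × Int)) :
    Nat → Int → List (List Int) → List (List Int)
  | 0, _, path => path.reverse
  | fuel + 1, pi, path =>
    if pi = -1 then path.reverse
    else
      match PySem.List.pyGet? journal pi with
      | none => path.reverse
      | some (st, pi') => bfs_alt_rebuild journal fuel pi' (path ++ [st])

-- Source B's `while frontier` / `for state, pi in frontier` pair: one entry of the
-- current level is handled per step, pushes go to the end of next_frontier, and
-- `frontier = next_frontier` is the step taken when the current level is spent.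
-- Entries carry the parent's index into the append-only journal (-1 for start).
-- Same fuel discipline (one unit per step) and bound as A's port.
def bfs_alt_step (goal : List Int) :
    Nat → List (List Int × Int) → List (List Int × Int) →
    PySem.Set (List Int) → List (List Int × Int) → List (List Int)
  | 0, _, _, _, _ => []
  | fuel + 1, [], next_frontier, visited, journal =>
    match next_frontier with
    | [] => []
    | e :: rest => bfs_alt_step goal fuel (e :: rest) [] visited journal
  | fuel + 1, (state, pi) :: rest, next_frontier, visited, journal =>
    if state = goal then bfs_alt_rebuild journal (journal.length + 1) pi [state]
    else if PySem.Set.contains visited state then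
      bfs_alt_step goal fuel rest next_frontier visited journal
    else
      let visited' := PySem.Set.add visited state
      let journal' := journal ++ [(state, pi)]
      let my : Int := (journal'.length : Int) - 1
      -- for i in range(len(state)-1): n = state[:i] + (state[i+1], state[i]) + state[i+2:]
      bfs_alt_step goal fuel rest
        ((List.range (state.length - 1)).foldl
          (fun acc i =>
            let n := state.take i ++ [state.getD (i + 1) 0, state.getD i 0] ++ state.drop (i + 2)
            if PySem.Set.contains visited' n then acc else acc ++ [(n, my)])
          next_frontier)
        visited' journal'

def bfs_alt (start : List Int) (goal : List Int) : List (List Int) :=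
  bfs_alt_step goal (2 * Nat.factorial start.length * start.length + 4)
    [(start, -1)] [] PySem.Set.empty []

-- ===== PRECONDITION & SPEC =====
def Spec_bfs (start : List Int) (goal : List Int) (out : List (List Int)) : Prop := out = bfs_alt start goal
instance (start : List Int) (goal : List Int) (out : List (List Int)) : Decidable (Spec_bfs start goal out) := by unfold Spec_bfs; infer_instance

-- ===== CLAIM (what is proved, stated in full; the proofs are below) =====
def Claim_equal_bfs : Prop := ∀ (start : List Int) (goal : List Int), Dom_bfs start goal → Spec_bfs start goal (bfs start goal)

-- ===== LEMMAS AND PROOFS =====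

-- `Resolves J pi p` : following parent indices from pi through journal J yields
-- exactly the A-side path p (root first); the length bound feeds the rebuild fuel
inductive Resolves (J : List (List Int × Int)) : Int → List (List Int) → Prop
  | nil : Resolves J (-1) []
  | cons (k : Nat) (st : List Int) (pi : Int) (p : List (List Int)) :
      J[k]? = some (st, pi) → p.length ≤ k → Resolves J pi p →
      Resolves J (k : Int) (p ++ [st])

theorem resolves_length {J : List (List Int × Int)} {pi : Int} {p : List (List Int)}
    (h : Resolves J pi p) : p.length ≤ J.length := by
  cases h with
  | nil => simp
  | cons k st pi' p' hget hlen _ =>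
    have hk : k < J.length := by
      by_contra hk
      rw [List.getElem?_eq_none (by omega)] at hget
      cases hget
    simp only [List.length_append, List.length_cons, List.length_nil]
    omega

theorem resolves_append {J : List (List Int × Int)} {pi : Int} {p : List (List Int)}
    (xs : List (List Int × Int)) (h : Resolves J pi p) : Resolves (J ++ xs) pi p := by
  induction h with
  | nil => exact Resolves.nil
  | cons k st pi' p' hget hlen _ ih =>
    have hk : k < J.length := by
      by_contra hk
      rw [List.getElem?_eq_none (by omega)] at hget
      cases hget
    exact Resolves.cons k st pi' p' (by rw [List.getElem?_append_left hk]; exact hget) hlen ih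

theorem rebuild_resolves {J : List (List Int × Int)} {pi : Int} {p : List (List Int)}
    (h : Resolves J pi p) : ∀ (fuel : Nat) (acc : List (List Int)), p.length ≤ fuel →
    bfs_alt_rebuild J fuel pi acc = p ++ acc.reverse := by
  induction h with
  | nil =>
    intro fuel acc _
    cases fuel with
    | zero => simp [bfs_alt_rebuild]
    | succ f => simp [bfs_alt_rebuild]
  | cons k st pi' p' hget hlen _ ih =>
    intro fuel acc hfuel
    cases fuel with
    | zero => simp at hfuel
    | succ f =>
      have hne : (k : Int) ≠ -1 := by omega
      simp only [bfs_alt_rebuild, if_neg hne, PySem.List.pyGet?_natCast, hget]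
      rw [ih f (acc ++ [st]) (by simp at hfuel ⊢; omega)]
      simp

-- correspondence between an A-queue entry (state, path) and a B-frontier entry
-- (state, pi): the parent index pi resolves through the journal to the path
def EntryR (J : List (List Int × Int)) (ea : List Int × List (List Int))
    (eb : List Int × Int) : Prop :=
  eb.1 = ea.1 ∧ Resolves J eb.2 ea.2

theorem forall2_entry_ext {J xs : List (List Int × Int)}
    {l1 : List (List Int × List (List Int))} {l2 : List (List Int × Int)}
    (h : List.Forall₂ (EntryR J) l1 l2) : List.Forall₂ (EntryR (J ++ xs)) l1 l2 := by
  refine h.imp ?_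
  intro a b hab
  exact ⟨hab.1, resolves_append xs hab.2⟩

theorem forall2_append {α β : Type} {R : α → β → Prop} {l1 u1 : List α} {l2 u2 : List β}
    (h : List.Forall₂ R l1 l2) (h' : List.Forall₂ R u1 u2) :
    List.Forall₂ R (l1 ++ u1) (l2 ++ u2) := by
  induction h with
  | nil => simpa using h'
  | cons hab _ ih => exact List.Forall₂.cons hab ih

theorem foldl_append_singleton {α β : Type} (g : α → β) (xs : List α) : ∀ acc : List β,
    xs.foldl (fun a i => a ++ [g i]) acc = acc ++ xs.map g := by
  induction xs with
  | nil => intro acc; simp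
  | cons x t ih => intro acc; simp [List.foldl_cons, ih]

theorem swap_eq_slice (s : List Int) : ∀ k : Nat, k + 1 < s.length →
    (s.set k (s.getD (k + 1) 0)).set (k + 1) (s.getD k 0) =
      s.take k ++ [s.getD (k + 1) 0, s.getD k 0] ++ s.drop (k + 2) := by
  induction s with
  | nil => intro k h; simp at h
  | cons a t ih =>
    intro k h
    match k, t with
    | 0, b :: t' => simp [List.getD]
    | k + 1, t =>
      have ht : k + 1 < t.length := by simpa using h
      simp only [List.set, List.getD_cons_succ, List.take_succ_cons, List.drop_succ_cons]
      simpa using ih k ht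

theorem get_neighbors_eq (s : List Int) :
    get_neighbors s = (List.range (s.length - 1)).map
      (fun k => s.take k ++ [s.getD (k + 1) 0, s.getD k 0] ++ s.drop (k + 2)) := by
  unfold get_neighbors
  rw [foldl_append_singleton]
  refine List.map_congr_left ?_
  intro k hk
  have hlt : k + 1 < s.length := by
    have := List.mem_range.mp hk
    omega
  exact swap_eq_slice s k hlt

-- the push folds: A conses (n, path ++ [state]) onto `back`, B appends (n, my)
-- to `next_frontier`; the invariant `Forall₂ (EntryR J') back.reverse next` holds
theorem fold_corr {J' : List (List Int × Int)} {my : Int}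
    {s : List Int} {p : List (List Int)} (hmy : Resolves J' my (p ++ [s]))
    (v' : PySem.Set (List Int)) (nb : Nat → List Int) :
    ∀ (ks : List Nat) (b1 : List (List Int × List (List Int))) (b2 : List (List Int × Int)),
      List.Forall₂ (EntryR J') b1.reverse b2 →
      List.Forall₂ (EntryR J')
        (ks.foldl (fun b k => if PySem.Set.contains v' (nb k) then b else (nb k, p ++ [s]) :: b) b1).reverse
        (ks.foldl (fun acc k => if PySem.Set.contains v' (nb k) then acc else acc ++ [(nb k, my)]) b2) := by
  intro ks
  induction ks with
  | nil => intro b1 b2 h; exact h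
  | cons k t ih =>
    intro b1 b2 h
    simp only [List.foldl_cons]
    by_cases hc : PySem.Set.contains v' (nb k) = true
    · rw [if_pos hc, if_pos hc]; exact ih _ _ h
    · rw [if_neg hc, if_neg hc]
      refine ih _ _ ?_
      simpa using forall2_append h (List.Forall₂.cons (⟨rfl, hmy⟩ : EntryR J' (nb k, p ++ [s]) (nb k, my)) List.Forall₂.nil)

theorem loop_eq (goal : List Int) : ∀ (fuel : Nat)
    (fa ba : List (List Int × List (List Int))) (fb nb J : List (List Int × Int))
    (visited : PySem.Set (List Int)),
    List.Forall₂ (EntryR J) fa fb → List.Forall₂ (EntryR J) ba.reverse nb →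
    bfs_loop goal fuel fa ba visited = bfs_alt_step goal fuel fb nb visited J := by
  intro fuel
  induction fuel with
  | zero => intro fa ba fb nb J visited _ _; rfl
  | succ fuel ih =>
    intro fa ba fb nb J visited hf hb
    cases hf with
    | nil =>
      generalize hrev : ba.reverse = br at hb
      cases hb with
      | nil =>
        simp only [bfs_loop, bfs_alt_step]
        rw [hrev]
      | cons he ht =>
        simp only [bfs_loop, bfs_alt_step]
        rw [hrev]
        exact ih _ [] _ [] _ _ (List.Forall₂.cons he ht) List.Forall₂.nil
    | cons he ht =>
      rename_i ea eb t1 t2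
      obtain ⟨s, p⟩ := ea
      obtain ⟨s2, pi⟩ := eb
      obtain ⟨h1, h2⟩ := he
      dsimp only at h1 h2
      subst h1
      simp only [bfs_loop, bfs_alt_step]
      by_cases hg : s2 = goal
      · rw [if_pos hg, if_pos hg]
        rw [rebuild_resolves h2 _ _ (Nat.le_succ_of_le (resolves_length h2))]
        simp
      · rw [if_neg hg, if_neg hg]
        by_cases hv : PySem.Set.contains visited s2 = true
        · rw [if_pos hv, if_pos hv]
          exact ih _ _ _ _ _ _ ht hb
        · rw [if_neg hv, if_neg hv]
          have hmy : Resolves (J ++ [(s2, pi)]) ((((J ++ [(s2, pi)]).length : Int)) - 1) (p ++ [s2]) := by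
            have hcast : (((J ++ [(s2, pi)]).length : Int)) - 1 = ((J.length : Nat) : Int) := by
              simp
            rw [hcast]
            exact Resolves.cons J.length s2 pi p (by simp)
              (resolves_length h2) (resolves_append [(s2, pi)] h2)
          refine ih _ _ _ _ _ _ (forall2_entry_ext ht) ?_
          rw [get_neighbors_eq, List.foldl_map]
          exact fold_corr hmy _ _ _ _ _ (forall2_entry_ext hb)

-- ===== VERDICT (by name: the statement is the Claim_ definition above) =====
theorem bfs_spec : Claim_equal_bfs := by
  intro start goal _
  unfold Spec_bfs bfs bfs_alt
  exact loop_eq goal _ _ _ _ _ [] _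
    (List.Forall₂.cons ⟨rfl, Resolves.nil⟩ List.Forall₂.nil) List.Forall₂.nil
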